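-- pv_equiv track=rewrite | github.com/melkaj/kg_melkaj_2020 | definitions.py | is_one_to_one
-- ===== SOURCE A (Python) =====
-- def sum_of_lists(list1):
--     total = 0
--     for elem in list1:
--         total += elem
--     return total
--
-- def is_one_to_one(str1, str2):
--     # Initializing empty dictionaries
--     dict_str1 = {}
--     dict_str2 = {}
--
--     # Iterate through the first string to get count of unique characters
--     for char in str1:
--         if dict_str1.get(char) == None:
--             dict_str1[char] = 1
--         else:
--             dict_str1[char] = dict_str1[char] + 1
--
--     # Iterate through the second string to get count of unique characters
--     for char in str2:
--         if dict_str2.get(char) == None: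
--             dict_str2[char] = 1
--         else:
--             dict_str2[char] = dict_str2[char] + 1
--
--     # Getting amount of unique characters in each string
--     amount_of_unique_char_str1 = len(dict_str1)
--     amount_of_unique_char_str2 = len(dict_str2)
--
--     # If amount of unique characters in each string match,
--     # then it can be mapped one to one
--     if (amount_of_unique_char_str1 == amount_of_unique_char_str2):
--         return True
--     else:
--         list_str2 = list(dict_str2.values())
--         # for the when the amount of unique characters in string1 is greater than string 2
--         # Then we have to check if the amount of unique characters in string 1 is less than
--         # the total characters in string 2
--         # (ex: hel - php)
--         if (amount_of_unique_char_str1 >= amount_of_unique_char_str2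
--              and amount_of_unique_char_str1 <= sum_of_lists(list_str2)):
--             return True
--         else:
--             return False
-- ===== SOURCE B (Python) =====
-- def is_one_to_one(str1, str2):
--     # Distinct-character count by recursive elimination: strip every
--     # occurrence of the first character, recurse on the rest.
--     def num_distinct(s):
--         if not s:
--             return 0
--         return 1 + num_distinct(s.replace(s[0], ''))
--
--     u1 = num_distinct(str1)
--     u2 = num_distinct(str2)
--     return u1 == u2 or (u2 < u1 <= len(str2))
-- ===== Notes on version B (the rewrite author's own statement) =====
-- stated objective: alternative
-- what changed: Replaces the two dict frequency-counting loops plus sum_of_lists by a recursive remove-first-character-and-recurse distinct counter (no dict, no counts kept) and one closed-form boolean using len(str2) as the total count of str2.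
import Mathlib
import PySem

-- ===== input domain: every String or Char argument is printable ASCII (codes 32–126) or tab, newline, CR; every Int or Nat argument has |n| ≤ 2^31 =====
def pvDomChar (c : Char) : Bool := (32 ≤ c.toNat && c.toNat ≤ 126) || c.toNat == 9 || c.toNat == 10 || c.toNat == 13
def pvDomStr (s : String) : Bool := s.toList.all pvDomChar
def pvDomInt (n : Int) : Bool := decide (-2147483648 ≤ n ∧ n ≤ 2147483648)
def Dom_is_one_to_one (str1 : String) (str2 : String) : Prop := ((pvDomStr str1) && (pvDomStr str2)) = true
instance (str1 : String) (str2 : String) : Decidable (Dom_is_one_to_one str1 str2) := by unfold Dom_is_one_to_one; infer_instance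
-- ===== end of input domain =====

-- B drops the dict frequency loops and sum helper: it counts distinct characters by recursively
-- removing every occurrence of the first character, and compares with len(str2) in one expression.
-- ===== PORT A =====
def sum_of_lists (list1 : List Int) : Int :=
  list1.foldl (fun total elem => total + elem) 0

-- the dict-building loop of A: d.get(char) == None ? d[char] = 1 : d[char] = d[char] + 1
def pvCountStep (d : PySem.Dict Char Int) (c : Char) : PySem.Dict Char Int :=
  if d.get? c = none then d.insert c 1 else d.insert c (d.getD c 0 + 1)

def is_one_to_one (str1 : String) (str2 : String) : Bool :=
  let dict_str1 := str1.toList.foldl pvCountStep PySem.Dict.empty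
  let dict_str2 := str2.toList.foldl pvCountStep PySem.Dict.empty
  let amount_of_unique_char_str1 := dict_str1.size
  let amount_of_unique_char_str2 := dict_str2.size
  if amount_of_unique_char_str1 = amount_of_unique_char_str2 then true
  else
    let list_str2 := dict_str2.values
    if amount_of_unique_char_str1 ≥ amount_of_unique_char_str2 ∧
        (amount_of_unique_char_str1 : Int) ≤ sum_of_lists list_str2 then true
    else false

-- ===== PORT B =====
-- Source B's num_distinct: s.replace(s[0], '') removes every occurrence of the first character
-- (exact as List.filter on the char list), then recurse.
def numDistinct (l : List Char) : Nat :=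
  match l with
  | [] => 0
  | a :: t => 1 + numDistinct ((a :: t).filter (fun c => c != a))
termination_by l.length
decreasing_by
  simp only [List.filter_cons, bne_self_eq_false, Bool.false_eq_true, if_false, List.length_cons]
  exact Nat.lt_succ_of_le (List.length_filter_le _ t)

def is_one_to_one_alt (str1 : String) (str2 : String) : Bool :=
  let u1 := numDistinct str1.toList
  let u2 := numDistinct str2.toList
  u1 == u2 || (decide (u2 < u1) && decide (u1 ≤ str2.toList.length))

-- ===== PRECONDITION & SPEC =====
def Spec_is_one_to_one (str1 : String) (str2 : String) (out : Bool) : Prop := out = is_one_to_one_alt str1 str2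
instance (str1 : String) (str2 : String) (out : Bool) : Decidable (Spec_is_one_to_one str1 str2 out) := by unfold Spec_is_one_to_one; infer_instance

-- ===== CLAIM (what is proved, stated in full; the proofs are below) =====
def Claim_equal_is_one_to_one : Prop := ∀ (str1 : String) (str2 : String), Dom_is_one_to_one str1 str2 → Spec_is_one_to_one str1 str2 (is_one_to_one str1 str2)

-- ===== LEMMAS AND PROOFS =====

theorem pvCountStep_eq : pvCountStep = fun (d : PySem.Dict Char Int) c => d.insert c (d.getD c 0 + 1) := by
  funext d c
  unfold pvCountStep
  by_cases h : d.get? c = none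
  · simp [h, PySem.Dict.getD_of_get?_eq_none _ _ h]
  · simp [h]

theorem pvCountLoop_eq_counter (l : List Char) :
    l.foldl pvCountStep PySem.Dict.empty = PySem.Dict.counter l := by
  rw [pvCountStep_eq, PySem.Dict.foldl_insert_getD_add_one_eq_counter]

theorem pvSize_counter (l : List Char) :
    (PySem.Dict.counter l).size = (PySem.Set.ofList l).length := by
  have h := PySem.Dict.keys_counter l
  have : (PySem.Dict.counter l).keys.length = (PySem.Set.ofList l).length := by rw [h]
  simpa [PySem.Dict.keys, PySem.Dict.size] using this

theorem pvOfList_perm_dedup (l : List Char) : (PySem.Set.ofList l).Perm l.dedup := by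
  rw [List.perm_ext_iff_of_nodup (PySem.Set.nodup_ofList l) l.nodup_dedup]
  intro a
  rw [PySem.Set.mem_ofList, List.mem_dedup]

theorem pvSum_values_counter (l : List Char) :
    sum_of_lists (PySem.Dict.counter l).values = (l.length : Int) := by
  rw [PySem.Dict.values_eq_map_keys _ (PySem.Dict.nodup_keys_counter l) 0,
      PySem.Dict.keys_counter l]
  unfold sum_of_lists
  have hfold : ∀ (m : List Int), m.foldl (fun total elem => total + elem) 0 = m.sum := by
    intro m
    simpa using PySem.List.foldl_add m (fun x => x) 0
  rw [hfold]
  simp only [PySem.Dict.getD_counter]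
  calc ((PySem.Set.ofList l).map fun k => ((l.count k : Nat) : Int)).sum
      = ((l.dedup).map fun k => ((l.count k : Nat) : Int)).sum := ((pvOfList_perm_dedup l).map _).sum_eq
    _ = (((l.dedup).map fun k => l.count k).sum : Int) := by
        rw [Nat.cast_list_sum, List.map_map]; rfl
    _ = (l.length : Int) := by rw [List.sum_map_count_dedup_eq_length]

-- B's recursive counter computes the number of distinct elements
theorem numDistinct_eq_card (l : List Char) : numDistinct l = l.toFinset.card := by
  induction l using numDistinct.induct with
  | case1 => simp [numDistinct]
  | case2 a t ih =>
    rw [numDistinct, ih]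
    have hfilter : ((a :: t).filter (fun c => c != a)).toFinset = (a :: t).toFinset.erase a := by
      rw [List.toFinset_filter]
      simp [Finset.filter_ne']
    rw [hfilter]
    have ha : a ∈ (a :: t).toFinset := by simp
    have := Finset.card_erase_add_one ha
    omega

theorem pvSize_eq_numDistinct (l : List Char) :
    (PySem.Set.ofList l).length = numDistinct l := by
  rw [numDistinct_eq_card, List.card_toFinset, (pvOfList_perm_dedup l).length_eq]

-- ===== VERDICT (by name: the statement is the Claim_ definition above) =====
theorem is_one_to_one_spec : Claim_equal_is_one_to_one := by
  intro str1 str2 _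
  unfold Spec_is_one_to_one is_one_to_one is_one_to_one_alt
  simp only [pvCountLoop_eq_counter, pvSize_counter, pvSum_values_counter,
    pvSize_eq_numDistinct]
  set u1 := numDistinct str1.toList with hu1
  set u2 := numDistinct str2.toList with hu2
  by_cases h : u1 = u2
  · simp [h]
  · simp only [h, if_false]
    split_ifs with h2
    · rcases h2 with ⟨hge, hle⟩
      have hlt : u2 < u1 := by omega
      have hle' : u1 ≤ str2.toList.length := by exact_mod_cast hle
      have hle'' : u1 ≤ str2.length := by rwa [String.length_toList] at hle'
      simp [hlt, hle'']
    · rw [not_and] at h2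
      by_cases hlt : u2 < u1
      · have := h2 (Nat.le_of_lt hlt)
        have hnle : ¬ u1 ≤ str2.length := by
          intro hle'
          exact this (by rw [← String.length_toList] at hle'; exact_mod_cast hle')
        simp [h, hlt, hnle]
      · simp [h, hlt]
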